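-- pv_equiv track=rewrite | github.com/gayatriprasad/python | fill.py | description
-- ===== SOURCE A (Python) =====
-- def description(bag):
--     my_dict1 = bag
--     new_dict = {}
--     for d_key,d_val in my_dict1.items():
--         if d_val in new_dict:
--             new_dict[d_val].append(d_key)
--         else:
--             new_dict[d_val] = [d_key]
--
--     for k in new_dict:
--         new_dict[k] = set(new_dict[k])
--     return new_dict
-- ===== SOURCE B (Python) =====
-- def description(bag):
--     # Invert the dict: for each distinct value (first-occurrence order), the set of keys mapping to it.
--     return {v: {k for k, w in bag.items() if w == v} for v in dict.fromkeys(bag.values())}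
-- ===== Notes on version B (the rewrite author's own statement) =====
-- stated objective: simpler
-- what changed: Instead of one accumulating pass that builds and mutates a value-keyed index of lists and then converts each list to a set, B computes the distinct values once (dict.fromkeys, first-occurrence order) and builds the result in a single dict comprehension that rescans all items per distinct value.
import Mathlib
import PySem

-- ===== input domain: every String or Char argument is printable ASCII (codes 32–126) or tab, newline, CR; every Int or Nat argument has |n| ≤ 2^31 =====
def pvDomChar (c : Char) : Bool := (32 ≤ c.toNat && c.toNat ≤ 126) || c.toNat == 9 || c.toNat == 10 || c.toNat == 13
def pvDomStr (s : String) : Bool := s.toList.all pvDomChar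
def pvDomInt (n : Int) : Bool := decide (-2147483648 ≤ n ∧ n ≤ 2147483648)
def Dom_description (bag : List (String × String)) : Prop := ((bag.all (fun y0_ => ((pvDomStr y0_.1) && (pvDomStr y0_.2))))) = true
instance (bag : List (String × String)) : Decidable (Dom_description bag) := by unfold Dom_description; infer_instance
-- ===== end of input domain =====

-- B replaces A's single accumulating pass over a mutated value→list index by a
-- dict comprehension over the distinct values that rescans all items per value (simpler, not faster).


-- ===== PORT A =====
-- one step of A's first loop: group the key under its value in new_dict
def descStep (d : PySem.Dict String (List String)) (kv : String × String) :
    PySem.Dict String (List String) :=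
  if d.contains kv.2 then d.modify kv.2 [] (fun l => l ++ [kv.1])
  else d.insert kv.2 [kv.1]

def description (bag : List (String × String)) : List (String × List String) :=
  let newDict := bag.foldl descStep PySem.Dict.empty
  -- second Python loop: for k in new_dict: new_dict[k] = set(new_dict[k])
  newDict.items.map (fun p => (p.1, PySem.Set.ofList p.2))

-- ===== PORT B =====
def description_alt (bag : List (String × String)) : List (String × List String) :=
  (PySem.List.dedup (bag.map Prod.snd)).map
    (fun v => (v, PySem.Set.ofList ((bag.filter (fun kv => kv.2 == v)).map Prod.fst)))

-- ===== PRECONDITION & SPEC =====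
def Spec_description (bag : List (String × String)) (out : List (String × List String)) : Prop := out = description_alt bag
instance (bag : List (String × String)) (out : List (String × List String)) : Decidable (Spec_description bag out) := by unfold Spec_description; infer_instance

-- ===== CLAIM (what is proved, stated in full; the proofs are below) =====
def Claim_equal_description : Prop := ∀ (bag : List (String × String)), Dom_description bag → Spec_description bag (description bag)

-- ===== LEMMAS AND PROOFS =====
-- the keys of bag mapping to value v, in order
def keysFor (bag : List (String × String)) (v : String) : List String :=
  (bag.filter (fun kv => kv.2 == v)).map Prod.fst

theorem keysFor_append_singleton (bag : List (String × String)) (kv : String × String) (v : String) :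
    keysFor (bag ++ [kv]) v = keysFor bag v ++ (if kv.2 == v then [kv.1] else []) := by
  simp only [keysFor, List.filter_append, List.map_append]
  by_cases h : kv.2 = v <;> simp [h]

-- invariant of A's first loop: the index holds the distinct values in first-occurrence
-- order, each with the keys mapping to it in order
theorem fold_items (bag : List (String × String)) :
    (bag.foldl descStep PySem.Dict.empty).items
      = (PySem.List.dedup (bag.map Prod.snd)).map (fun v => (v, keysFor bag v)) := by
  induction bag using List.reverseRecOn with
  | nil => rfl
  | append_singleton xs kv ih =>
    have hD : PySem.List.dedup ((xs ++ [kv]).map Prod.snd)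
        = PySem.Set.add (PySem.List.dedup (xs.map Prod.snd)) kv.2 := by
      simp [PySem.List.dedup_eq_ofList, PySem.Set.ofList_append_singleton]
    have hcon : (xs.foldl descStep PySem.Dict.empty).contains kv.2
        = decide (kv.2 ∈ PySem.List.dedup (xs.map Prod.snd)) := by
      simp only [PySem.Dict.contains, ih, List.any_map, Function.comp_def]
      rw [List.any_beq']
      simp
    rw [List.foldl_append]
    by_cases hm : kv.2 ∈ PySem.List.dedup (xs.map Prod.snd)
    · -- value already present: append the key to its list
      have hmem : (kv.2, keysFor xs kv.2) ∈ (xs.foldl descStep PySem.Dict.empty).items := by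
        rw [ih]; exact List.mem_map_of_mem hm
      have hnodup : (xs.foldl descStep PySem.Dict.empty).keys.Nodup := by
        simp only [PySem.Dict.keys, ih, List.map_map]
        simp [Function.comp_def]
      have hget : (xs.foldl descStep PySem.Dict.empty).getD kv.2 [] = keysFor xs kv.2 :=
        PySem.Dict.getD_of_mem_items _ hmem hnodup []
      show (descStep (xs.foldl descStep PySem.Dict.empty) kv).items = _
      rw [show descStep (xs.foldl descStep PySem.Dict.empty) kv
            = (xs.foldl descStep PySem.Dict.empty).modify kv.2 [] (fun l => l ++ [kv.1]) from by
          rw [descStep, hcon]; rw [if_pos (by simpa using hm)]]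
      rw [PySem.Dict.modify, hget]
      rw [PySem.Dict.items_insert_of_contains _ _ (by rw [hcon]; simpa using hm)]
      rw [hD, PySem.Set.add_of_mem hm, ih, List.map_map]
      refine List.map_congr_left (fun v hv => ?_)
      by_cases h : v = kv.2
      · subst h; simp [keysFor_append_singleton]
      · have h' : ¬ (kv.2 = v) := fun e => h e.symm
        simp [Function.comp, h, h', keysFor_append_singleton]
    · -- new value: append a fresh entry
      show (descStep (xs.foldl descStep PySem.Dict.empty) kv).items = _
      rw [show descStep (xs.foldl descStep PySem.Dict.empty) kv
            = (xs.foldl descStep PySem.Dict.empty).insert kv.2 [kv.1] from by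
          rw [descStep, hcon]; rw [if_neg (by simpa using hm)]]
      rw [PySem.Dict.items_insert_of_not_contains _ _ (by rw [hcon]; simpa using hm)]
      rw [hD, PySem.Set.add_of_not_mem hm, ih, List.map_append]
      have hkv : keysFor xs kv.2 = [] := by
        have : ∀ p ∈ xs, ¬ (p.2 == kv.2) = true := by
          intro p hp hb
          apply hm
          rw [PySem.List.mem_dedup]
          exact (eq_of_beq hb) ▸ List.mem_map_of_mem (f := Prod.snd) hp
        simp [keysFor, List.filter_eq_nil_iff.mpr this]
      congr 1
      · refine List.map_congr_left (fun v hv => ?_)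
        have h' : ¬ (kv.2 = v) := by
          intro e; exact hm (e ▸ hv)
        simp [keysFor_append_singleton, h']
      · simp [keysFor_append_singleton, hkv]

-- ===== VERDICT (by name: the statement is the Claim_ definition above) =====
theorem description_spec : Claim_equal_description := by
  intro bag _
  show description bag = description_alt bag
  simp only [description, description_alt, fold_items, List.map_map]
  rfl
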